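-- pv_equiv track=rewrite | github.com/artonson/autoinst | point-to-pixel-mapping/merge_pointclouds.py | build_associations
-- ===== SOURCE A (Python) =====
-- def build_associations(point_to_label_1: dict, point_to_label_2: dict):
--     '''
--     Args:
--         point_to_id1: dict that maps point indices to instance label color
--         point_to_id2: dict that maps point indices to instance label color
--     Returns:
--         associations: dict that maps original label colors from dict1 to associated label colors from dict2
--     '''
--
--     unique_ids1 = set(point_to_label_1.values())
--     unique_ids2 = set(point_to_label_2.values())
--
--     label_to_point_1 = {}
--     label_to_point_2 = {}
--
--     for id1 in unique_ids1:
--         label_to_point_1[id1] = [pixel for pixel, value in point_to_label_1.items() if value == id1]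
--
--     for id2 in unique_ids2:
--         label_to_point_2[id2] = [pixel for pixel, value in point_to_label_2.items() if value == id2]
--
--     # Create a dictionary to store the associations
--     associations = {}
--
--     for id1 in unique_ids1:
--         # If no association will be found, we just keep the original ID
--         best_id2 = None
--         best_iou = 0.0
--
--         indices1 = label_to_point_1[id1]
--
--         for id2 in unique_ids2:
--             indices2 = label_to_point_2[id2]
--             intersection = len(set(indices1) & set(indices2))
--             union = len(set(indices1) | set(indices2))
--             iou = intersection / union
--
--             if iou > best_iou:
--                 best_id2 = id2
--                 best_iou = iou
--
--         associations[id1] = best_id2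
--
--     return associations
-- ===== SOURCE B (Python) =====
-- def build_associations(point_to_label_1: dict, point_to_label_2: dict):
--     # One pass: label sizes + co-occurrence counts; IoU compared as exact integer fractions.
--     size1 = {}
--     for v in point_to_label_1.values():
--         size1[v] = size1.get(v, 0) + 1
--     size2 = {}
--     for v in point_to_label_2.values():
--         size2[v] = size2.get(v, 0) + 1
--     inter = {}
--     for p, v1 in point_to_label_1.items():
--         v2 = point_to_label_2.get(p)
--         if v2 is not None:
--             inter[(v1, v2)] = inter.get((v1, v2), 0) + 1
--     associations = {}
--     for id1, n1 in size1.items():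
--         best_id2 = None
--         best_i, best_u = 0, 1  # best IoU so far, as the exact fraction best_i / best_u
--         for id2, n2 in size2.items():
--             i = inter.get((id1, id2), 0)
--             u = n1 + n2 - i
--             if i * best_u > best_i * u:
--                 best_id2, best_i, best_u = id2, i, u
--         associations[id1] = best_id2
--     return associations
-- ===== Notes on version B (the rewrite author's own statement) =====
-- stated objective: faster
-- what changed: A rebuilds per-label point lists and materialises Python sets to intersect/union them for every label pair (O(U1*U2*N)); B makes one pass computing label sizes and a co-occurrence counter keyed on (label1,label2), then looks intersection and union up in O(1) per pair and compares IoUs as exact integer fractions instead of floats (O(N + U1*U2)).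
-- outside the precondition, e.g. on build_associations({1: 5, 2: 5}, {1: 3, 2: 1}): A returns {5: 1}, B returns {5: 3}
import Mathlib
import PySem

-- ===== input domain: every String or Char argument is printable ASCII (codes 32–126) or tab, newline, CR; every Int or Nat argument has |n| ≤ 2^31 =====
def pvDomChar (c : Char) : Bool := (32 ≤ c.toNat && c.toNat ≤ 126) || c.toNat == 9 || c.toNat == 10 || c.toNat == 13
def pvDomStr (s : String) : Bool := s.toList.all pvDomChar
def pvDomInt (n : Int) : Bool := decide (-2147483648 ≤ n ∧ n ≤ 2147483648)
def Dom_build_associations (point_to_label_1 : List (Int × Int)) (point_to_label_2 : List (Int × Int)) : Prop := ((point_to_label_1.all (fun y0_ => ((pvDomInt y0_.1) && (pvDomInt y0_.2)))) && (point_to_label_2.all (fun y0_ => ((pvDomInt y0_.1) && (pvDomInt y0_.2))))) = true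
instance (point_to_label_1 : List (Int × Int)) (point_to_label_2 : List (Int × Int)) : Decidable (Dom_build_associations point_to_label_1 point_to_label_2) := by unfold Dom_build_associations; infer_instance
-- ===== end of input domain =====

-- B replaces A's per-label-pair set intersections/unions (O(U1*U2*N)) by one pass of
-- co-occurrence and size counting with O(1) lookups per label pair (O(N + U1*U2)).

-- ===== PORT A =====
-- Python's float division 'intersection / union' and the float comparison 'iou > best_iou'
-- are ported as exact rational (ℚ) division/comparison: exact wherever double rounding does
-- not collapse two distinct IoU fractions (always at the tested sizes).
def build_associations (point_to_label_1 : List (Int × Int)) (point_to_label_2 : List (Int × Int)) : List (Int × Option Int) :=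
  let unique_ids1 : PySem.Set Int := PySem.Set.ofList (point_to_label_1.map Prod.snd)
  let unique_ids2 : PySem.Set Int := PySem.Set.ofList (point_to_label_2.map Prod.snd)
  let label_to_point_1 : PySem.Dict Int (List Int) :=
    unique_ids1.foldl (fun d id1 => d.insert id1 ((point_to_label_1.filter (fun pv => pv.2 == id1)).map Prod.fst)) PySem.Dict.empty
  let label_to_point_2 : PySem.Dict Int (List Int) :=
    unique_ids2.foldl (fun d id2 => d.insert id2 ((point_to_label_2.filter (fun pv => pv.2 == id2)).map Prod.fst)) PySem.Dict.empty
  let associations : PySem.Dict Int (Option Int) :=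
    unique_ids1.foldl (fun assoc id1 =>
      -- label_to_point_1[id1]: the key is always present (id1 ∈ unique_ids1), so getD is exact
      let indices1 := label_to_point_1.getD id1 []
      let best := unique_ids2.foldl (fun (b : Option Int × ℚ) id2 =>
        let indices2 := label_to_point_2.getD id2 []
        let intersection := PySem.Set.len (PySem.Set.inter (PySem.Set.ofList indices1) (PySem.Set.ofList indices2))
        let union := PySem.Set.len (PySem.Set.union (PySem.Set.ofList indices1) (PySem.Set.ofList indices2))
        let iou : ℚ := (intersection : ℚ) / (union : ℚ)
        if iou > b.2 then (some id2, iou) else b) ((none : Option Int), (0 : ℚ))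
      assoc.insert id1 best.1) PySem.Dict.empty
  associations.items

-- ===== PORT B =====
def build_associations_alt (point_to_label_1 : List (Int × Int)) (point_to_label_2 : List (Int × Int)) : List (Int × Option Int) :=
  let size1 : PySem.Dict Int Int := (point_to_label_1.map Prod.snd).foldl (fun d v => d.insert v (d.getD v 0 + 1)) PySem.Dict.empty
  let size2 : PySem.Dict Int Int := (point_to_label_2.map Prod.snd).foldl (fun d v => d.insert v (d.getD v 0 + 1)) PySem.Dict.empty
  let inter : PySem.Dict (Int × Int) Int := point_to_label_1.foldl (fun d pv =>
      match (PySem.Dict.mk point_to_label_2).get? pv.1 with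
      | some v2 => d.insert (pv.2, v2) (d.getD (pv.2, v2) 0 + 1)
      | none    => d) PySem.Dict.empty
  let associations : PySem.Dict Int (Option Int) := size1.items.foldl (fun assoc kn =>
      let best := size2.items.foldl (fun (b : Option Int × Int × Int) kn2 =>
          let i := inter.getD (kn.1, kn2.1) 0
          let u := kn.2 + kn2.2 - i
          if i * b.2.2 > b.2.1 * u then (some kn2.1, i, u) else b) ((none : Option Int), (0 : Int), (1 : Int))
      assoc.insert kn.1 best.1) PySem.Dict.empty
  associations.items

-- ===== PRECONDITION & SPEC =====
-- pvCntI l1 l2 a b = number of points carrying label a in map 1 and label b in map 2;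
-- pvCntU = size of the union of the two point sets (when the keys of each map are distinct).
def pvCntI (l1 l2 : List (Int × Int)) (a b : Int) : Nat :=
  l1.countP (fun pv => decide (pv.2 = a ∧ (pv.1, b) ∈ l2))
def pvCntU (l1 l2 : List (Int × Int)) (a b : Int) : Nat :=
  (l1.map Prod.snd).count a + (l2.map Prod.snd).count b - pvCntI l1 l2 a b
-- Pre_ excludes (i) association lists with duplicate keys (the Python functions receive real
-- dicts, whose keys are distinct) and (ii) inputs where two distinct labels of map 2 tie on a
-- nonzero IoU with some label of map 1: there A's winner is an accident of Python's set
-- iteration (hash) order, a corner neither behaviour can claim.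
def Pre_build_associations (point_to_label_1 : List (Int × Int)) (point_to_label_2 : List (Int × Int)) : Prop :=
  (point_to_label_1.map Prod.fst).Nodup ∧ (point_to_label_2.map Prod.fst).Nodup ∧
  ∀ a ∈ point_to_label_1.map Prod.snd, ∀ b ∈ point_to_label_2.map Prod.snd,
    ∀ b' ∈ point_to_label_2.map Prod.snd, b ≠ b' → 0 < pvCntI point_to_label_1 point_to_label_2 a b →
      pvCntI point_to_label_1 point_to_label_2 a b * pvCntU point_to_label_1 point_to_label_2 a b' ≠
      pvCntI point_to_label_1 point_to_label_2 a b' * pvCntU point_to_label_1 point_to_label_2 a b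
instance (point_to_label_1 : List (Int × Int)) (point_to_label_2 : List (Int × Int)) : Decidable (Pre_build_associations point_to_label_1 point_to_label_2) := by unfold Pre_build_associations; infer_instance

def pvWitness_build_associations : (List (Int × Int)) × (List (Int × Int)) := ([(1, 5), (2, 5), (3, 6)], [(1, 3), (2, 1), (3, 1)])

def Spec_build_associations (point_to_label_1 : List (Int × Int)) (point_to_label_2 : List (Int × Int)) (out : List (Int × Option Int)) : Prop := out = build_associations_alt point_to_label_1 point_to_label_2
instance (point_to_label_1 : List (Int × Int)) (point_to_label_2 : List (Int × Int)) (out : List (Int × Option Int)) : Decidable (Spec_build_associations point_to_label_1 point_to_label_2 out) := by unfold Spec_build_associations; infer_instance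

-- ===== CLAIM (what is proved, stated in full; the proofs are below) =====
def Claim_equal_build_associations : Prop := ∀ (point_to_label_1 : List (Int × Int)) (point_to_label_2 : List (Int × Int)), Dom_build_associations point_to_label_1 point_to_label_2 → Pre_build_associations point_to_label_1 point_to_label_2 → Spec_build_associations point_to_label_1 point_to_label_2 (build_associations point_to_label_1 point_to_label_2)

-- ===== LEMMAS AND PROOFS =====

-- pvInd l a = the points of l carrying label a, in order (A's per-label index list).
def pvInd (l : List (Int × Int)) (a : Int) : List Int :=
  (l.filter (fun pv => pv.2 == a)).map Prod.fst

lemma pv_nodup_ind (l : List (Int × Int)) (a : Int) (h : (l.map Prod.fst).Nodup) :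
    (pvInd l a).Nodup := by
  unfold pvInd
  exact h.sublist (List.Sublist.map Prod.fst List.filter_sublist)

lemma pv_len_ind (l : List (Int × Int)) (a : Int) :
    (pvInd l a).length = (l.map Prod.snd).count a := by
  unfold pvInd
  rw [List.length_map, ← List.countP_eq_length_filter, List.count_eq_countP, List.countP_map]
  rfl

-- |s∩t| counted from either side, for duplicate-free lists.
lemma pv_countP_mem_comm (s t : List Int) (hs : s.Nodup) (ht : t.Nodup) :
    s.countP (fun x => decide (x ∈ t)) = t.countP (fun x => decide (x ∈ s)) := by
  have h1 : ∀ (u v : List Int), u.Nodup →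
      u.countP (fun x => decide (x ∈ v)) = (u.toFinset ∩ v.toFinset).card := by
    intro u v hu
    rw [List.countP_eq_length_filter, ← List.toFinset_card_of_nodup (hu.filter _),
      List.toFinset_filter]
    congr 1
    ext x
    simp [Finset.mem_inter]
  rw [h1 s t hs, h1 t s ht, Finset.inter_comm]

lemma pv_cntI_from_ind (l1 l2 : List (Int × Int)) (a b : Int) :
    (pvInd l1 a).countP (fun x => decide (x ∈ pvInd l2 b)) = pvCntI l1 l2 a b := by
  unfold pvInd pvCntI
  rw [List.countP_map, List.countP_filter]
  apply List.countP_congr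
  intro pv _
  simp [and_comm]

lemma pv_cntI_le_cnt1 (l1 l2 : List (Int × Int)) (a b : Int) :
    pvCntI l1 l2 a b ≤ (l1.map Prod.snd).count a := by
  unfold pvCntI
  rw [List.count_eq_countP', List.countP_map]
  apply List.countP_mono_left
  intro pv _ h
  simp only [decide_eq_true_eq] at h
  simpa using h.1

-- A's intersection cardinality, as a count.
lemma pv_interA (l1 l2 : List (Int × Int)) (a b : Int)
    (h1 : (l1.map Prod.fst).Nodup) (h2 : (l2.map Prod.fst).Nodup) :
    PySem.Set.len (PySem.Set.inter (PySem.Set.ofList (pvInd l1 a)) (PySem.Set.ofList (pvInd l2 b)))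
      = (pvCntI l1 l2 a b : Int) := by
  rw [PySem.Set.ofList_eq_self_of_nodup _ (pv_nodup_ind l1 a h1),
      PySem.Set.ofList_eq_self_of_nodup _ (pv_nodup_ind l2 b h2)]
  unfold PySem.Set.len PySem.Set.inter
  rw [← List.countP_eq_length_filter]
  congr 1
  rw [← pv_cntI_from_ind l1 l2 a b]
  apply List.countP_congr
  intro x _
  simp [PySem.Set.contains]

-- A's union cardinality, as counts.
lemma pv_unionA (l1 l2 : List (Int × Int)) (a b : Int)
    (h1 : (l1.map Prod.fst).Nodup) (h2 : (l2.map Prod.fst).Nodup) :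
    PySem.Set.len (PySem.Set.union (PySem.Set.ofList (pvInd l1 a)) (PySem.Set.ofList (pvInd l2 b)))
      = (pvCntU l1 l2 a b : Int) := by
  rw [PySem.Set.ofList_eq_self_of_nodup _ (pv_nodup_ind l1 a h1),
      PySem.Set.ofList_eq_self_of_nodup _ (pv_nodup_ind l2 b h2)]
  unfold PySem.Set.len PySem.Set.union
  rw [PySem.Set.update_eq_append_filter, PySem.Set.ofList_eq_self_of_nodup _ (pv_nodup_ind l2 b h2)]
  rw [List.length_append, ← List.countP_eq_length_filter]
  have e1 : (pvInd l1 a).length = (l1.map Prod.snd).count a := pv_len_ind l1 a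
  have e2 : (pvInd l2 b).length = (l2.map Prod.snd).count b := pv_len_ind l2 b
  have e3 : (pvInd l2 b).countP (fun y => decide (y ∈ pvInd l1 a)) = pvCntI l1 l2 a b := by
    rw [pv_countP_mem_comm _ _ (pv_nodup_ind l2 b h2) (pv_nodup_ind l1 a h1)]
    exact pv_cntI_from_ind l1 l2 a b
  have e4 : (pvInd l2 b).countP (fun y => !(PySem.Set.contains (pvInd l1 a) y))
      = (pvInd l2 b).countP (fun y => decide ¬(decide (y ∈ pvInd l1 a)) = true) := by
    apply List.countP_congr; intro x _; simp [PySem.Set.contains]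
  have e5 := List.length_eq_countP_add_countP (fun y => decide (y ∈ pvInd l1 a)) (l := pvInd l2 b)
  have e6 := pv_cntI_le_cnt1 l1 l2 a b
  unfold pvCntU
  omega

-- The label_to_point dicts of A: lookup of a member label yields its index list.
lemma pv_lab_getD (l : List (Int × Int)) (a : Int)
    (ha : a ∈ PySem.Set.ofList (l.map Prod.snd)) :
    ((PySem.Set.ofList (l.map Prod.snd)).foldl
        (fun d id1 => d.insert id1 ((l.filter (fun pv => pv.2 == id1)).map Prod.fst))
        PySem.Dict.empty).getD a []
      = pvInd l a := by
  have hnd : (PySem.Set.ofList (l.map Prod.snd)).Nodup := PySem.Set.nodup_ofList _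
  have hitems := PySem.Dict.items_foldl_insert_fresh (PySem.Set.ofList (l.map Prod.snd))
      (fun x => x) (fun id1 => (l.filter (fun pv => pv.2 == id1)).map Prod.fst) PySem.Dict.empty
      (fun _ _ => PySem.Dict.contains_empty _) (by simp)
  apply PySem.Dict.getD_of_mem_items
  · rw [hitems]
    simp only [PySem.Dict.empty, List.nil_append]
    exact List.mem_map.mpr ⟨a, ha, rfl⟩
  · unfold PySem.Dict.keys
    rw [hitems]
    simp only [PySem.Dict.empty, List.nil_append, List.map_map]
    rw [show ((fun (x : Int × List Int) => x.1) ∘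
        (fun a => (a, (l.filter (fun pv => pv.2 == a)).map Prod.fst))) = fun a => a from rfl,
      List.map_id']
    exact hnd

-- B's co-occurrence loop, reshaped as a counter over a filterMap.
lemma pv_foldl_match_filterMap (l : List (Int × Int)) (g : Int → Option Int)
    (d : PySem.Dict (Int × Int) Int) :
    l.foldl (fun d pv =>
        match g pv.1 with
        | some v2 => d.insert (pv.2, v2) (d.getD (pv.2, v2) 0 + 1)
        | none    => d) d
      = (l.filterMap (fun pv => (g pv.1).map (fun v2 => (pv.2, v2)))).foldl
          (fun d x => d.insert x (d.getD x 0 + 1)) d := by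
  induction l generalizing d with
  | nil => rfl
  | cons pv tl ih =>
    simp only [List.foldl_cons, List.filterMap_cons]
    cases hg : g pv.1 with
    | none => simpa using ih d
    | some v2 => simp only [Option.map_some, List.foldl_cons]; exact ih _

lemma pv_interB (l1 l2 : List (Int × Int)) (a b : Int)
    (h2 : (l2.map Prod.fst).Nodup) :
    (l1.foldl (fun d pv =>
        match (PySem.Dict.mk l2).get? pv.1 with
        | some v2 => d.insert (pv.2, v2) (d.getD (pv.2, v2) 0 + 1)
        | none    => d) (PySem.Dict.empty : PySem.Dict (Int × Int) Int)).getD (a, b) 0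
      = (pvCntI l1 l2 a b : Int) := by
  rw [pv_foldl_match_filterMap, PySem.Dict.getD_foldl_insert_add_one, PySem.Dict.getD_empty]
  have hkeys : (PySem.Dict.mk l2).keys.Nodup := by
    unfold PySem.Dict.keys
    simpa [Function.comp] using h2
  rw [List.count_eq_countP, List.countP_filterMap]
  have hmem_iff : ∀ p v, (PySem.Dict.mk l2).get? p = some v ↔ (p, v) ∈ l2 :=
    fun p v => PySem.Dict.get?_eq_some_iff_mem_items (PySem.Dict.mk l2) p v hkeys
  have hcnt : l1.countP (fun pv =>
        (Option.map (fun x => x == (a, b))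
          (Option.map (fun v2 => (pv.2, v2)) ((PySem.Dict.mk l2).get? pv.1))).getD false)
      = pvCntI l1 l2 a b := by
    unfold pvCntI
    refine List.countP_congr (fun pv _ => ?_)
    cases hg : (PySem.Dict.mk l2).get? pv.1 with
    | none =>
      simp only [Option.map_none, Option.getD_none, Bool.false_eq_true, false_iff,
        decide_eq_true_eq, not_and]
      intro hva hmemb
      have := (hmem_iff pv.1 b).mpr hmemb
      rw [hg] at this
      simp at this
    | some v2 =>
      have hv2 : (pv.1, v2) ∈ l2 := (hmem_iff pv.1 v2).mp hg
      simp only [Option.map_some, Option.getD_some, beq_iff_eq, Prod.mk.injEq,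
        decide_eq_true_eq]
      constructor
      · rintro ⟨hva, hvb⟩; exact ⟨hva, hvb ▸ hv2⟩
      · rintro ⟨hva, hmemb⟩
        refine ⟨hva, ?_⟩
        have := (hmem_iff pv.1 b).mpr hmemb
        rw [hg] at this
        exact Option.some_inj.mp this
  rw [zero_add, hcnt]

-- Pure step functions for the two inner loops.
def pvStepA (l1 l2 : List (Int × Int)) (a : Int) (b : Option Int × ℚ) (id2 : Int) : Option Int × ℚ :=
  let i := PySem.Set.len (PySem.Set.inter (PySem.Set.ofList (pvInd l1 a)) (PySem.Set.ofList (pvInd l2 id2)))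
  let u := PySem.Set.len (PySem.Set.union (PySem.Set.ofList (pvInd l1 a)) (PySem.Set.ofList (pvInd l2 id2)))
  if (i : ℚ) / (u : ℚ) > b.2 then (some id2, (i : ℚ) / (u : ℚ)) else b

def pvStepB (l1 l2 : List (Int × Int)) (a n1 : Int) (b : Option Int × Int × Int) (kn2 : Int × Int) :
    Option Int × Int × Int :=
  let i : Int := (pvCntI l1 l2 a kn2.1 : Int)
  let u := n1 + kn2.2 - i
  if i * b.2.2 > b.2.1 * u then (some kn2.1, i, u) else b

-- The two inner loops agree (first components), by induction with related states.
lemma pv_inner_eq (l1 l2 : List (Int × Int)) (a : Int)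
    (h1 : (l1.map Prod.fst).Nodup) (h2 : (l2.map Prod.fst).Nodup) :
    ∀ (ids2 : List Int), (∀ b ∈ ids2, b ∈ l2.map Prod.snd) →
    ∀ (sA : Option Int × ℚ) (sB : Option Int × Int × Int),
      sA.1 = sB.1 → sA.2 = (sB.2.1 : ℚ) / (sB.2.2 : ℚ) → 0 < sB.2.2 →
      (ids2.foldl (pvStepA l1 l2 a) sA).1
        = (ids2.foldl (fun s k => pvStepB l1 l2 a ((l1.map Prod.snd).count a) s
            (k, ((l2.map Prod.snd).count k : Int))) sB).1 := by
  intro ids2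
  induction ids2 with
  | nil => intro _ sA sB h0 _ _; exact h0
  | cons b tl ih =>
    intro hmem sA sB h0 hq hbu
    have hb : b ∈ l2.map Prod.snd := hmem b (List.mem_cons_self)
    have htl : ∀ x ∈ tl, x ∈ l2.map Prod.snd := fun x hx => hmem x (List.mem_cons_of_mem _ hx)
    simp only [List.foldl_cons]
    -- the two step conditions coincide
    have hIle : pvCntI l1 l2 a b ≤ (l1.map Prod.snd).count a := pv_cntI_le_cnt1 l1 l2 a b
    have hc2 : 0 < (l2.map Prod.snd).count b := List.count_pos_iff.mpr hb
    have hUpos : 0 < pvCntU l1 l2 a b := by unfold pvCntU; omega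
    have hUeq : ((l1.map Prod.snd).count a : Int) + ((l2.map Prod.snd).count b : Int)
        - (pvCntI l1 l2 a b : Int) = (pvCntU l1 l2 a b : Int) := by
      unfold pvCntU; omega
    have hcond : ((pvCntI l1 l2 a b : Int) : ℚ) / ((pvCntU l1 l2 a b : Int) : ℚ) > sA.2
        ↔ sB.2.1 * (((l1.map Prod.snd).count a : Int) + ((l2.map Prod.snd).count b : Int)
              - (pvCntI l1 l2 a b : Int)) < (pvCntI l1 l2 a b : Int) * sB.2.2 := by
      rw [hUeq, hq]
      have hu' : (0 : ℚ) < ((pvCntU l1 l2 a b : Int) : ℚ) := by exact_mod_cast hUpos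
      have hbu' : (0 : ℚ) < (sB.2.2 : ℚ) := by exact_mod_cast hbu
      rw [gt_iff_lt, div_lt_div_iff₀ hbu' hu']
      constructor
      · intro h; exact_mod_cast h
      · intro h; exact_mod_cast h
    unfold pvStepA pvStepB
    simp only [pv_interA l1 l2 a b h1 h2, pv_unionA l1 l2 a b h1 h2]
    by_cases h : ((pvCntI l1 l2 a b : Int) : ℚ) / ((pvCntU l1 l2 a b : Int) : ℚ) > sA.2
    · rw [if_pos h, if_pos (hcond.mp h)]
      apply ih htl
      · rfl
      · simp only
        rw [hUeq]
      · simp only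
        rw [hUeq]; exact_mod_cast hUpos
    · rw [if_neg h, if_neg (fun hc => h (hcond.mpr hc))]
      exact ih htl sA sB h0 hq hbu

-- Folding 'insert (k x) (v x)' from the empty dict over distinct keys lists the pairs.
lemma pv_items_fold_assoc {β : Type} (l : List β) (k : β → Int) (v : β → Option Int)
    (hnd : (l.map k).Nodup) :
    (l.foldl (fun assoc x => assoc.insert (k x) (v x)) PySem.Dict.empty).items
      = l.map (fun x => (k x, v x)) := by
  have h := PySem.Dict.items_foldl_insert_fresh l k v PySem.Dict.empty
      (fun _ _ => PySem.Dict.contains_empty _) hnd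
  simp only [PySem.Dict.empty, List.nil_append] at h
  exact h

lemma pv_items_fold_assoc' (l : List (Int × Int)) (v : (Int × Int) → Option Int)
    (hnd : (l.map (fun kn => kn.1)).Nodup) :
    (l.foldl (fun assoc kn => assoc.insert kn.1 (v kn)) PySem.Dict.empty).items
      = l.map (fun kn => (kn.1, v kn)) :=
  pv_items_fold_assoc l (fun kn => kn.1) v hnd

-- A in closed form: a map over the distinct labels of map 1.
lemma pv_portA (l1 l2 : List (Int × Int)) :
    build_associations l1 l2
      = (PySem.Set.ofList (l1.map Prod.snd)).map (fun a =>
          (a, ((PySem.Set.ofList (l2.map Prod.snd)).foldl (pvStepA l1 l2 a)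
            ((none : Option Int), (0 : ℚ))).1)) := by
  simp only [build_associations]
  rw [pv_items_fold_assoc _ (fun x => x) _ (by simp)]
  apply List.map_congr_left
  intro a ha
  rw [pv_lab_getD l1 a ha]
  congr 1
  congr 1
  apply PySem.List.foldl_congr_mem
  intro acc id2 hid2
  rw [pv_lab_getD l2 id2 hid2]
  rfl

-- B in closed form: the same map.
lemma pv_portB (l1 l2 : List (Int × Int))
    (h2 : (l2.map Prod.fst).Nodup) :
    build_associations_alt l1 l2
      = (PySem.Set.ofList (l1.map Prod.snd)).map (fun a =>
          (a, ((PySem.Set.ofList (l2.map Prod.snd)).foldl (fun s k =>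
              pvStepB l1 l2 a ((l1.map Prod.snd).count a) s (k, ((l2.map Prod.snd).count k : Int)))
            ((none : Option Int), (0 : Int), (1 : Int))).1)) := by
  simp only [build_associations_alt]
  rw [PySem.Dict.foldl_insert_getD_add_one_eq_counter, PySem.Dict.foldl_insert_getD_add_one_eq_counter]
  rw [pv_items_fold_assoc' _ _
      (by rw [PySem.Dict.items_counter, List.map_map,
            show ((fun (kn : Int × Int) => kn.1) ∘ fun k => (k, ((l1.map Prod.snd).count k : Int)))
              = fun k => k from rfl, List.map_id']
          exact PySem.Set.nodup_ofList _)]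
  rw [PySem.Dict.items_counter, PySem.Dict.items_counter, List.map_map]
  apply List.map_congr_left
  intro a ha
  simp only [Function.comp]
  congr 1
  congr 1
  rw [List.foldl_map]
  apply PySem.List.foldl_congr_mem
  intro acc k hk
  rw [pv_interB l1 l2 a k h2]
  rfl

-- ===== VERDICT (by name: the statement is the Claim_ definition above) =====
theorem build_associations_spec : Claim_equal_build_associations := by
  intro l1 l2 _ hpre
  obtain ⟨h1, h2, _⟩ := hpre
  unfold Spec_build_associations
  rw [pv_portA l1 l2, pv_portB l1 l2 h2]
  apply List.map_congr_left
  intro a ha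
  congr 1
  exact pv_inner_eq l1 l2 a h1 h2 _ (fun b hb => (PySem.Set.mem_ofList _ _).mp hb)
    _ _ rfl (by norm_num) (by norm_num)
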